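-- pv_equiv track=rewrite | github.com/frankwirgit/leet_code | leet_m_level.py | f1043
-- ===== SOURCE A (Python) =====
-- def f1043(A, K):
--     n = len(A)
--     dp = [0] * n
--     curMax = 0
--     for i in range(n):
--         if i < K:
--             curMax = max(curMax, A[i])
--             dp[i] = curMax * (i + 1)
--         else:
--             curMax = 0
--             for j in range(1, K + 1):
--                 curMax = max(A[i - j + 1], curMax)
--                 dp[i] = max(dp[i], dp[i - j] + curMax * j)
--     return dp[n - 1]
-- ===== SOURCE B (Python) =====
-- def f1043(A, K):
--     # Demand-driven (top-down) evaluation of best(p) = optimal value for the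
--     # prefix A[:p], with best(p) = max over j=1..min(K,p) of best(p-j) + max(window)*j,
--     # memoized in a dict and driven by an explicit stack (no recursion limit issues).
--     memo = {0: 0}
--     stack = [len(A)]
--     while stack:
--         p = stack.pop()
--         if p in memo:
--             continue
--         if p - 1 not in memo:
--             stack.append(p)
--             stack.append(p - 1)
--             continue
--         m = 0
--         res = 0
--         for j in range(1, min(K, p) + 1):
--             m = max(m, A[p - j])
--             res = max(res, memo[p - j] + m * j)
--         memo[p] = res
--     return memo[len(A)]
-- ===== Notes on version B (the rewrite author's own statement) =====
-- stated objective: alternative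
-- what changed: A fills a dp array bottom-up with a special-cased branch for the first K positions (a carried running prefix max and dp[i]=curMax*(i+1)); B instead evaluates one uniform recurrence best(p)=max_{1<=j<=min(K,p)} best(p-j)+max(window)*j top-down on demand, memoized in a dict and driven by an explicit stack.
import Mathlib
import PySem

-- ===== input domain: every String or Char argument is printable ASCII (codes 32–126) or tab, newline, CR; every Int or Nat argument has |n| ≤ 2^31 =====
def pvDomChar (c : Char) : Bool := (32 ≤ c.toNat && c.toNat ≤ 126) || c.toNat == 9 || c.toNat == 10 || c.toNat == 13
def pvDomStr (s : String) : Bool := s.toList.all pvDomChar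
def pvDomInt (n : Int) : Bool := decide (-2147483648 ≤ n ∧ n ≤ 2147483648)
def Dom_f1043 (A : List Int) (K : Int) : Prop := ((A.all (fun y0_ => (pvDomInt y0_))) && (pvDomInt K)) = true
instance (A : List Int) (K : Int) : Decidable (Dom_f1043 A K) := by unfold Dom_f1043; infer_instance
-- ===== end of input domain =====

-- B is an alternative implementation of the same O(n·K) partition DP: a demand-driven
-- (top-down) evaluation of one uniform recurrence, memoized in a dict and driven by an
-- explicit stack, instead of A's bottom-up array loop with a special-cased first window.

-- ===== PORT A =====
-- Literal transliteration of A. dp[i] reads/writes and A[...] reads use the total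
-- pyGetD/pySetD forms: every index A executes is in range on every input (checked in
-- the proofs); the final 'return dp[n-1]' raises IndexError exactly when A = [],
-- which Pre_f1043 excludes.
def f1043 (A : List Int) (K : Int) : Int :=
  let n := A.length
  let st := (PySem.List.pyRange 0 (n : Int) 1).foldl
    (fun (st : List Int × Int) i =>
      if i < K then
        let c := max st.2 (PySem.List.pyGetD A i 0)
        (PySem.List.pySetD st.1 i (c * (i + 1)), c)
      else
        (PySem.List.pyRange 1 (K + 1) 1).foldl
          (fun (st2 : List Int × Int) j =>
            let c := max (PySem.List.pyGetD A (i - j + 1) 0) st2.2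
            (PySem.List.pySetD st2.1 i
              (max (PySem.List.pyGetD st2.1 i 0)
                   (PySem.List.pyGetD st2.1 (i - j) 0 + c * j)), c))
          (st.1, 0))
    (List.replicate n 0, 0)
  PySem.List.pyGetD st.1 ((n : Int) - 1) 0

-- ===== PORT B =====
-- Transliteration of Source B. The Python stack appends/pops at the END of a list; here the
-- HEAD of the list is the top of the stack (only the top is ever accessed). The while
-- loop runs on fuel; 3*len(A)+3 iterations are ample (proved in the lemmas below) and
-- the 0-fuel branch is never reached. memo[p-j] is always present (interval invariant),
-- ported as getD _ 0.
def altLoop (A : List Int) (K : Int) : Nat → PySem.Dict Int Int → List Int → PySem.Dict Int Int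
  | _, memo, [] => memo
  | 0, memo, _ => memo
  | fuel + 1, memo, p :: rest =>
    if memo.contains p then altLoop A K fuel memo rest
    else if ¬ (memo.contains (p - 1)) then altLoop A K fuel memo ((p - 1) :: p :: rest)
    else
      let mr := (PySem.List.pyRange 1 (min K p + 1) 1).foldl
        (fun (s : Int × Int) j =>
          let m := max s.1 (PySem.List.pyGetD A (p - j) 0)
          (m, max s.2 (memo.getD (p - j) 0 + m * j))) (0, 0)
      altLoop A K fuel (memo.insert p mr.2) rest

def f1043_alt (A : List Int) (K : Int) : Int :=
  let n : Int := (A.length : Int)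
  (altLoop A K (3 * A.length + 3) (PySem.Dict.empty.insert 0 0) [n]).getD n 0

-- ===== PRECONDITION & SPEC =====
-- Pre_ excludes exactly the inputs on which A raises: on an empty A, 'return dp[n-1]'
-- is dp[-1] of the empty dp list — IndexError.
def Pre_f1043 (A : List Int) (K : Int) : Prop := A ≠ []
instance (A : List Int) (K : Int) : Decidable (Pre_f1043 A K) := by unfold Pre_f1043; infer_instance
def pvWitness_f1043 : List Int × Int := ([3, 1, 2], 2)

def Spec_f1043 (A : List Int) (K : Int) (out : Int) : Prop := out = f1043_alt A K
instance (A : List Int) (K : Int) (out : Int) : Decidable (Spec_f1043 A K out) := by unfold Spec_f1043; infer_instance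

-- ===== CLAIM (what is proved, stated in full; the proofs are below) =====
def Claim_equal_f1043 : Prop := ∀ (A : List Int) (K : Int), Dom_f1043 A K → Pre_f1043 A K → Spec_f1043 A K (f1043 A K)

-- ===== LEMMAS AND PROOFS =====

-- ---- generic fold lemmas ----
theorem foldl_rel {α β γ : Type} (R : α → β → Prop) (f : α → γ → α) (h : β → γ → β)
    (l : List γ) (a : α) (b : β) (hab : R a b)
    (hstep : ∀ x ∈ l, ∀ a b, R a b → R (f a x) (h b x)) :
    R (l.foldl f a) (l.foldl h b) := by
  induction l generalizing a b with
  | nil => exact hab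
  | cons x xs ih =>
    exact ih (f a x) (h b x) (hstep x (by simp) a b hab)
      (fun y hy => hstep y (by simp [hy]))

theorem foldl_congr_mem' {α γ : Type} (f h : α → γ → α) (l : List γ) (a : α)
    (hfg : ∀ x ∈ l, ∀ a, f a x = h a x) : l.foldl f a = l.foldl h a := by
  induction l generalizing a with
  | nil => rfl
  | cons x xs ih => rw [List.foldl_cons, List.foldl_cons, hfg x (by simp)];
                    exact ih _ (fun y hy a => hfg y (by simp [hy]) a)

-- ---- prefix clamped max ----
def cpm (A : List Int) (p : Nat) : Int := (A.take p).foldl max 0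

theorem foldl_max_ge_init (l : List Int) (s : Int) : s ≤ l.foldl max s := by
  induction l generalizing s with
  | nil => exact le_refl _
  | cons x xs ih => exact le_trans (le_max_left s x) (ih _)

theorem cpm_nonneg (A : List Int) (p : Nat) : 0 ≤ cpm A p := foldl_max_ge_init _ _

theorem cpm_succ (A : List Int) (p : Nat) (hp : p < A.length) :
    cpm A (p + 1) = max (cpm A p) (PySem.List.pyGetD A (p : Int) 0) := by
  unfold cpm
  rw [List.take_add_one, List.getElem?_eq_getElem hp, PySem.List.pyGetD_natCast]
  simp only [Option.toList_some, List.foldl_append, List.foldl_cons, List.foldl_nil]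
  rw [List.getD_eq_getElem?_getD, List.getElem?_eq_getElem hp]
  rfl

theorem cpm_elem_le (A : List Int) (p t : Nat) (hp : p ≤ A.length) (ht : t < p) :
    PySem.List.pyGetD A (t : Int) 0 ≤ cpm A p := by
  induction p with
  | zero => omega
  | succ q ih =>
    rw [cpm_succ A q (by omega)]
    rcases Nat.lt_succ_iff_lt_or_eq.mp ht with h | h
    · exact le_trans (ih (by omega) h) (le_max_left _ _)
    · subst h; exact le_max_right _ _

theorem cpm_le_of (A : List Int) (p : Nat) (M : Int) (hp : p ≤ A.length) (h0 : 0 ≤ M)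
    (hel : ∀ t : Nat, t < p → PySem.List.pyGetD A (t : Int) 0 ≤ M) : cpm A p ≤ M := by
  induction p with
  | zero => simpa [cpm] using h0
  | succ q ih =>
    rw [cpm_succ A q (by omega)]
    exact max_le (ih (by omega) (fun t ht => hel t (by omega))) (hel q (by omega))

theorem cpm_mono (A : List Int) (a b : Nat) (hab : a ≤ b) (hb : b ≤ A.length) :
    cpm A a ≤ cpm A b :=
  cpm_le_of A a _ (by omega) (cpm_nonneg A b) (fun t ht => cpm_elem_le A b t hb (by omega))

-- ---- the common specification: table of optimal prefix values ----
def gstepF (A : List Int) (p : Int) (t : List Int) (s : Int × Int) (j : Int) : Int × Int :=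
  let m := max s.1 (PySem.List.pyGetD A (p - j) 0)
  (m, max s.2 (t.getD (p - j).toNat 0 + m * j))

def gstep (A : List Int) (K : Int) (t : List Int) : Int × Int :=
  (PySem.List.pyRange 1 (min K (t.length : Int) + 1) 1).foldl
    (gstepF A (t.length : Int) t) (0, 0)

def gtbl (A : List Int) (K : Int) : Nat → List Int
  | 0 => [0]
  | p + 1 => gtbl A K p ++ [(gstep A K (gtbl A K p)).2]

def g (A : List Int) (K : Int) (p : Nat) : Int := (gtbl A K p).getD p 0

theorem gtbl_length (A : List Int) (K : Int) (p : Nat) : (gtbl A K p).length = p + 1 := by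
  induction p with
  | zero => rfl
  | succ q ih => simp [gtbl, ih]

theorem gtbl_getD (A : List Int) (K : Int) (p q : Nat) (h : q ≤ p) :
    (gtbl A K p).getD q 0 = g A K q := by
  induction p with
  | zero => interval_cases q; rfl
  | succ r ih =>
    rcases Nat.lt_or_ge q (r + 1) with hq | hq
    · rw [show gtbl A K (r + 1) = gtbl A K r ++ [(gstep A K (gtbl A K r)).2] from rfl]
      rw [List.getD_eq_getElem?_getD, List.getElem?_append_left (by rw [gtbl_length]; omega),
        ← List.getD_eq_getElem?_getD]
      exact ih (by omega)
    · have hq' : q = r + 1 := by omega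
      subst hq'; rfl

theorem g_zero (A : List Int) (K : Int) : g A K 0 = 0 := rfl

theorem g_succ (A : List Int) (K : Int) (p : Nat) :
    g A K (p + 1) = (gstep A K (gtbl A K p)).2 := by
  unfold g
  rw [show gtbl A K (p + 1) = gtbl A K p ++ [(gstep A K (gtbl A K p)).2] from rfl]
  rw [List.getD_eq_getElem?_getD, List.getElem?_append_right (by rw [gtbl_length])]
  simp [gtbl_length]

-- ---- backward window max ----
def bmax (A : List Int) (p : Nat) : Nat → Int
  | 0 => 0
  | c + 1 => max (bmax A p c) (PySem.List.pyGetD A ((p : Int) - ((c : Int) + 1)) 0)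

theorem bmax_nonneg (A : List Int) (p c : Nat) : 0 ≤ bmax A p c := by
  induction c with
  | zero => exact le_refl _
  | succ d ih => exact le_trans ih (le_max_left _ _)

theorem bmax_le_cpm (A : List Int) (p c : Nat) (hc : c ≤ p) (hp : p ≤ A.length) :
    bmax A p c ≤ cpm A p := by
  induction c with
  | zero => exact cpm_nonneg A p
  | succ d ih =>
    refine max_le (ih (by omega)) ?_
    have : ((p : Int) - ((d : Int) + 1)) = ((p - (d + 1) : Nat) : Int) := by omega
    rw [this]
    exact cpm_elem_le A p (p - (d + 1)) hp (by omega)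

theorem bmax_ge_elem (A : List Int) (p c t : Nat) (h1 : p - c ≤ t) (h2 : t < p) :
    PySem.List.pyGetD A (t : Int) 0 ≤ bmax A p c := by
  induction c with
  | zero => omega
  | succ d ih =>
    rcases Nat.lt_or_ge t (p - (d + 1)) with h | h
    · omega
    · rcases Nat.lt_or_ge t (p - d) with h' | h'
      · have : ((p : Int) - ((d : Int) + 1)) = (t : Int) := by omega
        unfold bmax; rw [this]; exact le_max_right _ _
      · exact le_trans (ih h') (le_max_left _ _)

theorem bmax_full_eq_cpm (A : List Int) (p : Nat) (hp : p ≤ A.length) :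
    bmax A p p = cpm A p := by
  refine le_antisymm (bmax_le_cpm A p p (le_refl _) hp) ?_
  exact cpm_le_of A p _ hp (bmax_nonneg A p p)
    (fun t ht => bmax_ge_elem A p p t (by omega) ht)

-- ---- partial inner fold ----
def pfold (A : List Int) (p : Nat) (t : List Int) (c : Nat) : Int × Int :=
  (PySem.List.pyRange 1 ((c : Int) + 1) 1).foldl (gstepF A (p : Int) t) (0, 0)

theorem pfold_zero (A : List Int) (p : Nat) (t : List Int) : pfold A p t 0 = (0, 0) := by
  simp [pfold, PySem.List.pyRange_one_eq_nil]

theorem pfold_succ (A : List Int) (p : Nat) (t : List Int) (c : Nat) :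
    pfold A p t (c + 1) = gstepF A (p : Int) t (pfold A p t c) ((c : Int) + 1) := by
  unfold pfold
  rw [show (((c + 1 : Nat) : Int) + 1) = (((c : Int) + 1) + 1) by push_cast; ring,
    PySem.List.pyRange_one_succ_right (by omega), List.foldl_append]
  rfl

theorem pfold_fst (A : List Int) (p : Nat) (t : List Int) (c : Nat) :
    (pfold A p t c).1 = bmax A p c := by
  induction c with
  | zero => rw [pfold_zero]; rfl
  | succ d ih =>
    rw [pfold_succ]
    show max (pfold A p t d).1 _ = _
    rw [ih]
    rfl

theorem gstep_eq_pfold (A : List Int) (K : Int) (t : List Int) :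
    gstep A K t = pfold A t.length t (min K (t.length : Int)).toNat := by
  unfold gstep pfold
  by_cases h : min K (t.length : Int) ≤ 0
  · rw [PySem.List.pyRange_one_eq_nil (by omega),
      PySem.List.pyRange_one_eq_nil (by omega)]
  · congr 1
    rw [Int.toNat_of_nonneg (by omega)]

-- ---- the first-window closed form: g p = cpm p * p whenever p ≤ K ----
theorem L1 (A : List Int) (K : Int) (p : Nat) (hp : p ≤ A.length) (hK : (p : Int) ≤ K) :
    g A K p = cpm A p * p := by
  induction p using Nat.strong_induction_on with
  | _ p ih =>
  match p, hp, hK with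
  | 0, _, _ => simp [g_zero, cpm]
  | (q + 1), hp, hK =>
    set p := q + 1 with hpdef
    have hlen : (gtbl A K q).length = p := gtbl_length A K q
    have hmin : (min K ((gtbl A K q).length : Int)).toNat = p := by
      rw [hlen]; omega
    have hg : g A K p = (pfold A p (gtbl A K q) p).2 := by
      rw [g_succ, gstep_eq_pfold, hmin, hlen]
    -- every partial value is bounded by cpm p * p
    have ub : ∀ c : Nat, c ≤ p → (pfold A p (gtbl A K q) c).2 ≤ cpm A p * (p : Int) := by
      intro c hc
      induction c with
      | zero =>
        rw [pfold_zero]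
        exact mul_nonneg (cpm_nonneg A p) (by positivity)
      | succ d ihd =>
        rw [pfold_succ]
        show max (pfold A p (gtbl A K q) d).2 _ ≤ _
        refine max_le (ihd (by omega)) ?_
        have hr : ((p : Int) - ((d : Int) + 1)).toNat = p - (d + 1) := by omega
        rw [pfold_fst, hr, gtbl_getD A K q (p - (d + 1)) (by omega)]
        have hrec : g A K (p - (d + 1)) = cpm A (p - (d + 1)) * ((p - (d + 1) : Nat) : Int) :=
          ih (p - (d + 1)) (by omega) (by omega) (by omega)
        rw [hrec]
        have h1 : cpm A (p - (d + 1)) ≤ cpm A p := cpm_mono A _ p (by omega) hp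
        have h2 : max (bmax A p d) (PySem.List.pyGetD A ((p : Int) - ((d : Int) + 1)) 0)
            ≤ cpm A p := by
          have := bmax_le_cpm A p (d + 1) (by omega) hp
          simpa [bmax] using this
        have h3 : cpm A (p - (d + 1)) * ((p - (d + 1) : Nat) : Int)
            ≤ cpm A p * ((p - (d + 1) : Nat) : Int) :=
          mul_le_mul_of_nonneg_right h1 (by positivity)
        have h4 : max (bmax A p d) (PySem.List.pyGetD A ((p : Int) - ((d : Int) + 1)) 0)
              * ((d : Int) + 1) ≤ cpm A p * ((d : Int) + 1) :=
          mul_le_mul_of_nonneg_right h2 (by positivity)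
        have h5 : ((p - (d + 1) : Nat) : Int) = (p : Int) - ((d : Int) + 1) := by
          omega
        rw [h5] at h3 ⊢
        have h6 : cpm A p * ((p : Int) - ((d : Int) + 1)) + cpm A p * ((d : Int) + 1)
            = cpm A p * (p : Int) := by ring
        linarith [h3, h4, h6]
    -- the single-segment split attains it
    have lb : cpm A p * (p : Int) ≤ (pfold A p (gtbl A K q) p).2 := by
      have hq : p = q + 1 := hpdef
      calc cpm A p * (p : Int)
          ≤ max (pfold A p (gtbl A K q) q).2
              ((gtbl A K q).getD ((p : Int) - ((q : Int) + 1)).toNat 0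
                + max (pfold A p (gtbl A K q) q).1
                    (PySem.List.pyGetD A ((p : Int) - ((q : Int) + 1)) 0) * ((q : Int) + 1)) := by
            have hz : ((p : Int) - ((q : Int) + 1)).toNat = 0 := by omega
            rw [hz, gtbl_getD A K q 0 (by omega), g_zero, pfold_fst]
            have hm : max (bmax A p q) (PySem.List.pyGetD A ((p : Int) - ((q : Int) + 1)) 0)
                = bmax A p p := by
              rw [hq]; rfl
            rw [hm, bmax_full_eq_cpm A p hp]
            have : ((q : Int) + 1) = (p : Int) := by omega
            rw [this]
            exact le_trans (le_of_eq (by ring)) (le_max_right _ _)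
        _ = (pfold A p (gtbl A K q) p).2 := by
            conv_rhs => rw [hq, pfold_succ]
            rfl
    have := le_antisymm (ub p (le_refl p)) lb
    rw [hg]
    omega

-- ---- the dp list A maintains, in closed form ----
def dpSpec (A : List Int) (K : Int) (i : Nat) : List Int :=
  (List.range A.length).map (fun t => if t < i then g A K (t + 1) else 0)

theorem dpSpec_length (A : List Int) (K : Int) (i : Nat) :
    (dpSpec A K i).length = A.length := by simp [dpSpec]

theorem dpSpec_getElem (A : List Int) (K : Int) (i t : Nat) (h : t < (dpSpec A K i).length) :
    (dpSpec A K i)[t] = if t < i then g A K (t + 1) else 0 := by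
  simp [dpSpec]

theorem dpSpec_zero (A : List Int) (K : Int) :
    dpSpec A K 0 = List.replicate A.length 0 := by
  apply List.ext_getElem (by simp [dpSpec_length])
  intro t h1 h2
  rw [dpSpec_getElem A K 0 t h1]
  simp

theorem dpSpec_set_zero (A : List Int) (K : Int) (i : Nat) :
    (dpSpec A K i).set i 0 = dpSpec A K i := by
  apply List.ext_getElem (by simp)
  intro t h1 h2
  rw [List.getElem_set, dpSpec_getElem A K i t h2]
  split_ifs with h3 h4 <;> first | rfl | omega

theorem dpSpec_set_succ (A : List Int) (K : Int) (i : Nat) :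
    (dpSpec A K i).set i (g A K (i + 1)) = dpSpec A K (i + 1) := by
  apply List.ext_getElem (by simp [dpSpec_length])
  intro t h1 h2
  rw [List.getElem_set, dpSpec_getElem A K (i + 1) t h2,
    dpSpec_getElem A K i t (by simpa using h1)]
  split_ifs with h3 h4 h5 <;> first | rfl | omega | (subst h3; rfl)

-- ---- A's inner loop produces exactly the gstep fold ----
theorem innerA (A : List Int) (K : Int) (i : Nat) (hi : i < A.length) (hK : K ≤ (i : Int)) :
    ∃ c : Int,
      (PySem.List.pyRange 1 (K + 1) 1).foldl
        (fun (st2 : List Int × Int) j =>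
          let c := max (PySem.List.pyGetD A ((i : Int) - j + 1) 0) st2.2
          (PySem.List.pySetD st2.1 (i : Int)
            (max (PySem.List.pyGetD st2.1 (i : Int) 0)
                 (PySem.List.pyGetD st2.1 ((i : Int) - j) 0 + c * j)), c))
        (dpSpec A K i, 0)
      = (dpSpec A K (i + 1), c) := by
  have hlen : (gtbl A K i).length = i + 1 := gtbl_length A K i
  have hrange : PySem.List.pyRange 1 (K + 1) 1
      = PySem.List.pyRange 1 (min K (((gtbl A K i).length : Nat) : Int) + 1) 1 := by
    rw [hlen]
    congr 1
    rw [min_eq_left (by push_cast; omega)]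
  have hrel := foldl_rel
    (fun (st : List Int × Int) (s : Int × Int) =>
      st.2 = s.1 ∧ st.1 = (dpSpec A K i).set i s.2)
    (fun (st2 : List Int × Int) j =>
      let c := max (PySem.List.pyGetD A ((i : Int) - j + 1) 0) st2.2
      (PySem.List.pySetD st2.1 (i : Int)
        (max (PySem.List.pyGetD st2.1 (i : Int) 0)
             (PySem.List.pyGetD st2.1 ((i : Int) - j) 0 + c * j)), c))
    (gstepF A (((gtbl A K i).length : Nat) : Int) (gtbl A K i))
    (PySem.List.pyRange 1 (K + 1) 1) (dpSpec A K i, 0) ((0 : Int), (0 : Int))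
    (by exact ⟨rfl, (dpSpec_set_zero A K i).symm⟩)
    ?_
  · refine ⟨(gstep A K (gtbl A K i)).1, ?_⟩
    have hg : (PySem.List.pyRange 1 (K + 1) 1).foldl
        (gstepF A (((gtbl A K i).length : Nat) : Int) (gtbl A K i)) ((0 : Int), (0 : Int))
        = gstep A K (gtbl A K i) := by
      rw [hrange]; rfl
    rw [hg] at hrel
    obtain ⟨h1, h2⟩ := hrel
    have hset : (dpSpec A K i).set i (gstep A K (gtbl A K i)).2 = dpSpec A K (i + 1) := by
      rw [← g_succ, dpSpec_set_succ]
    exact Prod.ext (by rw [h2, hset]) h1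
  · -- step preservation
    rintro j hj ⟨dp, c⟩ ⟨m, res⟩ ⟨hcm, hdp⟩
    have hj' : 1 ≤ j ∧ j < K + 1 := (PySem.List.mem_pyRange_one).mp hj
    have hjle : j ≤ (i : Int) := by omega
    simp only at hcm hdp ⊢
    subst hcm hdp
    set r : Nat := i - j.toNat with hr
    have hri : ((i : Int) - j) = (r : Int) := by omega
    have hrlt : r < i := by omega
    constructor
    · -- the running maxima agree
      unfold gstepF
      rw [hlen]
      have : (i : Int) - j + 1 = (((i + 1 : Nat) : Int)) - j := by push_cast; ring
      rw [this, max_comm]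
    · -- the dp lists agree
      unfold gstepF
      simp only
      rw [PySem.List.pySetD_natCast, List.set_set]
      congr 1
      have hget_i : PySem.List.pyGetD ((dpSpec A K i).set i res) (i : Int) 0 = res := by
        rw [PySem.List.pyGetD_natCast, List.getD_eq_getElem?_getD,
          List.getElem?_eq_getElem (by rw [List.length_set, dpSpec_length]; exact hi)]
        simp
      have hget_r : PySem.List.pyGetD ((dpSpec A K i).set i res) ((i : Int) - j) 0
          = g A K (r + 1) := by
        rw [hri, PySem.List.pyGetD_natCast, List.getD_eq_getElem?_getD,
          List.getElem?_eq_getElem (by rw [List.length_set, dpSpec_length]; omega)]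
        rw [List.getElem_set]
        rw [if_neg (by omega), dpSpec_getElem A K i r (by rw [dpSpec_length]; omega),
          if_pos hrlt]
        rfl
      have hget_t : (gtbl A K i).getD ((((gtbl A K i).length : Nat) : Int) - j).toNat 0
          = g A K (r + 1) := by
        rw [hlen]
        have : (((i + 1 : Nat) : Int) - j).toNat = r + 1 := by push_cast; omega
        rw [this]
        exact gtbl_getD A K i (r + 1) (by omega)
      rw [hget_i, hget_r, hget_t, hlen]
      have hidx : (i : Int) - j + 1 = (((i + 1 : Nat) : Int)) - j := by push_cast; ring
      rw [hidx, max_comm c]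

-- ---- A's outer loop invariant ----
theorem outerA (A : List Int) (K : Int) (i : Nat) (hi : i ≤ A.length) :
    ∃ c : Int,
      (PySem.List.pyRange 0 (i : Int) 1).foldl
        (fun (st : List Int × Int) i =>
          if i < K then
            let c := max st.2 (PySem.List.pyGetD A i 0)
            (PySem.List.pySetD st.1 i (c * (i + 1)), c)
          else
            (PySem.List.pyRange 1 (K + 1) 1).foldl
              (fun (st2 : List Int × Int) j =>
                let c := max (PySem.List.pyGetD A (i - j + 1) 0) st2.2
                (PySem.List.pySetD st2.1 i
                  (max (PySem.List.pyGetD st2.1 i 0)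
                       (PySem.List.pyGetD st2.1 (i - j) 0 + c * j)), c))
              (st.1, 0))
        (List.replicate A.length 0, 0)
      = (dpSpec A K i, c) ∧ ((i : Int) ≤ K → c = cpm A i) := by
  induction i with
  | zero =>
    refine ⟨0, ?_, fun _ => by simp [cpm]⟩
    rw [show ((0 : Nat) : Int) = 0 from rfl,
      PySem.List.pyRange_one_eq_nil (le_refl 0), List.foldl_nil, dpSpec_zero]
  | succ i ih =>
    obtain ⟨c, hc, hcK⟩ := ih (by omega)
    have hpeel : PySem.List.pyRange 0 (((i + 1 : Nat)) : Int) 1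
        = PySem.List.pyRange 0 (i : Int) 1 ++ [(i : Int)] := by
      rw [show (((i + 1 : Nat)) : Int) = (i : Int) + 1 by push_cast; ring]
      exact PySem.List.pyRange_one_succ_right (by omega)
    rw [hpeel, List.foldl_append, hc, List.foldl_cons, List.foldl_nil]
    by_cases hK : (i : Int) < K
    · rw [if_pos hK]
      have hceq : c = cpm A i := hcK (by omega)
      refine ⟨max c (PySem.List.pyGetD A (i : Int) 0), ?_, fun _ => ?_⟩
      · have hv : max c (PySem.List.pyGetD A (i : Int) 0) * ((i : Int) + 1)
            = g A K (i + 1) := by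
          rw [hceq, ← cpm_succ A i (by omega),
            L1 A K (i + 1) (by omega) (by push_cast; omega)]
          push_cast; ring
        simp only
        rw [hv, PySem.List.pySetD_natCast, dpSpec_set_succ]
      · rw [hceq, cpm_succ A i (by omega)]
    · rw [if_neg hK]
      obtain ⟨c', hc'⟩ := innerA A K i (by omega) (by omega)
      exact ⟨c', hc', fun h => absurd h (by omega)⟩

theorem fA_eq_g (A : List Int) (K : Int) (h : A ≠ []) : f1043 A K = g A K A.length := by
  obtain ⟨c, hc, -⟩ := outerA A K A.length (le_refl _)
  have hlen : 1 ≤ A.length := List.length_pos_iff.mpr h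
  unfold f1043
  simp only
  rw [hc]
  simp only
  rw [show ((A.length : Int) - 1) = (((A.length - 1 : Nat)) : Int) by omega,
    PySem.List.pyGetD_natCast, List.getD_eq_getElem?_getD,
    List.getElem?_eq_getElem (by rw [dpSpec_length]; omega),
    dpSpec_getElem A K A.length (A.length - 1) (by rw [dpSpec_length]; omega),
    if_pos (by omega)]
  simp only [Option.getD_some]
  congr 1
  omega

-- ---- B's memo dict after the first t values are computed ----
def memoUpTo (A : List Int) (K : Int) : Nat → PySem.Dict Int Int
  | 0 => PySem.Dict.empty.insert 0 0
  | t + 1 => (memoUpTo A K t).insert (((t + 1 : Nat)) : Int) (g A K (t + 1))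

theorem memo_contains (A : List Int) (K : Int) (t : Nat) (k : Int) :
    (memoUpTo A K t).contains k = true ↔ 0 ≤ k ∧ k ≤ (t : Int) := by
  induction t with
  | zero =>
    rw [show memoUpTo A K 0 = PySem.Dict.empty.insert 0 0 from rfl,
      PySem.Dict.contains_insert]
    simp [PySem.Dict.contains_empty]
    omega
  | succ r ih =>
    rw [show memoUpTo A K (r + 1)
        = (memoUpTo A K r).insert (((r + 1 : Nat)) : Int) (g A K (r + 1)) from rfl,
      PySem.Dict.contains_insert]
    simp only [Bool.or_eq_true, beq_iff_eq, ih]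
    push_cast
    omega

theorem memo_getD (A : List Int) (K : Int) (t q : Nat) (hq : q ≤ t) :
    (memoUpTo A K t).getD (q : Int) 0 = g A K q := by
  induction t with
  | zero =>
    have : q = 0 := by omega
    subst this
    rw [show memoUpTo A K 0 = PySem.Dict.empty.insert 0 0 from rfl,
      PySem.Dict.getD_insert]
    simp [g_zero]
  | succ r ih =>
    rw [show memoUpTo A K (r + 1)
        = (memoUpTo A K r).insert (((r + 1 : Nat)) : Int) (g A K (r + 1)) from rfl,
      PySem.Dict.getD_insert]
    by_cases h : q = r + 1
    · subst h; simp
    · rw [if_neg (by exact_mod_cast h), ih (by omega)]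

-- ---- the stack contents during B's run ----
def ascL (a n : Nat) : List Int := (List.range' a (n + 1 - a)).map Int.ofNat

theorem ascL_nil (a n : Nat) (h : n < a) : ascL a n = [] := by
  unfold ascL
  rw [show n + 1 - a = 0 by omega]
  rfl

theorem ascL_cons (a n : Nat) (h : a ≤ n) : ascL a n = (a : Int) :: ascL (a + 1) n := by
  unfold ascL
  rw [show n + 1 - a = (n - a) + 1 by omega, List.range'_succ,
    show n + 1 - (a + 1) = n - a by omega]
  rfl

-- ---- B's compute step produces g (t+1) ----
theorem altStep (A : List Int) (K : Int) (t : Nat) :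
    ((PySem.List.pyRange 1 (min K (((t + 1 : Nat)) : Int) + 1) 1).foldl
      (fun (s : Int × Int) j =>
        let m := max s.1 (PySem.List.pyGetD A ((((t + 1 : Nat)) : Int) - j) 0)
        (m, max s.2 ((memoUpTo A K t).getD ((((t + 1 : Nat)) : Int) - j) 0 + m * j)))
      (0, 0)).2 = g A K (t + 1) := by
  rw [g_succ]
  have hlen : (gtbl A K t).length = t + 1 := gtbl_length A K t
  have hcast : (((gtbl A K t).length : Nat) : Int) = (((t + 1 : Nat)) : Int) := by
    rw [hlen]
  unfold gstep
  rw [hcast]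
  congr 1
  apply foldl_congr_mem'
  intro j hj s
  have hj' : 1 ≤ j ∧ j < min K (((t + 1 : Nat)) : Int) + 1 :=
    (PySem.List.mem_pyRange_one).mp hj
  have hjt : j ≤ (t : Int) + 1 := by
    have := min_le_right K (((t + 1 : Nat)) : Int)
    push_cast at hj' ⊢
    omega
  have hq : (((t + 1 : Nat)) : Int) - j = (((t + 1 - j.toNat : Nat)) : Int) := by
    push_cast; omega
  unfold gstepF
  simp only [hq,
    show ((((t + 1 - j.toNat : Nat)) : Int)).toNat = t + 1 - j.toNat by omega,
    memo_getD A K t (t + 1 - j.toNat) (by omega),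
    gtbl_getD A K t (t + 1 - j.toNat) (by omega)]

-- ---- running B's stack loop from any intermediate state ----
theorem runB (A : List Int) (K : Int) (fuel t a : Nat)
    (hta : t < a) (han : a ≤ A.length)
    (hfuel : (a - t - 1) + 2 * (A.length - t) + 1 ≤ fuel) :
    altLoop A K fuel (memoUpTo A K t) (ascL a A.length)
      = memoUpTo A K A.length := by
  induction fuel generalizing t a with
  | zero => omega
  | succ f ih =>
    rw [ascL_cons a A.length han]
    show altLoop A K (f + 1) (memoUpTo A K t) ((a : Int) :: ascL (a + 1) A.length) = _
    rw [altLoop]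
    rw [if_neg (by
      intro hcon
      have := (memo_contains A K t (a : Int)).mp hcon
      omega)]
    by_cases hstep : a = t + 1
    · -- all dependencies are present: compute g a and pop
      rw [if_neg (by
        simp only [Decidable.not_not]
        apply (memo_contains A K t ((a : Int) - 1)).mpr
        omega)]
      simp only
      subst hstep
      rw [show ((t + 1 : Nat) : Int) = (((t + 1 : Nat)) : Int) from rfl]
      rw [altStep A K t]
      rcases Nat.lt_or_ge (t + 1) A.length with hlt | hge
      · exact ih (t + 1) (t + 2) (by omega) (by omega) (by omega)
      · have hn : t + 1 = A.length := by omega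
        rw [ascL_nil (t + 2) A.length (by omega)]
        rw [show altLoop A K f ((memoUpTo A K t).insert ((t + 1 : Nat) : Int) (g A K (t + 1))) []
            = (memoUpTo A K t).insert ((t + 1 : Nat) : Int) (g A K (t + 1)) by cases f <;> rfl]
        rw [show (memoUpTo A K t).insert ((t + 1 : Nat) : Int) (g A K (t + 1))
            = memoUpTo A K (t + 1) from rfl, hn]
    · -- a dependency is missing: descend
      rw [if_pos (by
        intro hcon
        have := (memo_contains A K t ((a : Int) - 1)).mp hcon
        omega)]
      have hcons : ((a : Int) - 1) :: (a : Int) :: ascL (a + 1) A.length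
          = ascL (a - 1) A.length := by
        rw [ascL_cons (a - 1) A.length (by omega),
          show (((a - 1 : Nat)) : Int) = (a : Int) - 1 by omega,
          show a - 1 + 1 = a by omega, ascL_cons a A.length han]
      rw [hcons]
      exact ih t (a - 1) (by omega) (by omega) (by omega)

-- ---- B computes g n ----
theorem fB_eq_g (A : List Int) (K : Int) : f1043_alt A K = g A K A.length := by
  unfold f1043_alt
  simp only
  rcases Nat.eq_zero_or_pos A.length with hn | hn
  · rw [hn]
    rw [show altLoop A K (3 * 0 + 3) (PySem.Dict.empty.insert 0 0) [((0 : Nat) : Int)]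
        = PySem.Dict.empty.insert 0 0 by
      rw [altLoop, if_pos (by rw [PySem.Dict.contains_insert]; simp)]
      rfl]
    rw [show ((0 : Nat) : Int) = (0 : Int) from rfl, PySem.Dict.getD_insert]
    simp [g_zero]
  · have hasc : [((A.length : Nat) : Int)] = ascL A.length A.length := by
      rw [ascL_cons A.length A.length (le_refl _), ascL_nil (A.length + 1) A.length (by omega)]
    rw [hasc,
      show PySem.Dict.empty.insert 0 0 = memoUpTo A K 0 from rfl,
      runB A K (3 * A.length + 3) 0 A.length (by omega) (le_refl _) (by omega),
      memo_getD A K A.length A.length (le_refl _)]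

-- ===== VERDICT (by name: the statement is the Claim_ definition above) =====
theorem f1043_spec : Claim_equal_f1043 := by
  intro A K _ hpre
  unfold Spec_f1043
  rw [fA_eq_g A K hpre, fB_eq_g A K]
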